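-- pv_equiv track=rewrite | github.com/hphphpcat/hwcode | aaa.py | solution
-- ===== SOURCE A (Python) =====
-- def solution(numbers):
--     arr1 = [numbers[0]]
--     arr2 = [numbers[1]]
--     for i in range(2,len(numbers)):
--         cnt1 = 0
--         for x in arr1:
--             if x > numbers[i]:
--                 cnt1 += 1
--         for x in arr2:
--             if x > numbers[i]:
--                 cnt1 -= 1
--         if cnt1!=0:
--             if cnt1>0:
--                 arr1.append(numbers[i])
--             else:
--                 arr2.append(numbers[i])
--         else:
--             if len(arr1) <= len(arr2):
--                 arr1.append(numbers[i])
--             else: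
--                 arr2.append(numbers[i])
--     arr1.extend(arr2)
--     return arr1
-- ===== SOURCE B (Python) =====
-- def _bisect_right(s, v):
--     # standard-library bisect.bisect_right algorithm, hand-written (A imports nothing)
--     lo, hi = 0, len(s)
--     while lo < hi:
--         mid = (lo + hi) // 2
--         if v < s[mid]:
--             hi = mid
--         else:
--             lo = mid + 1
--     return lo
--
--
-- def solution(numbers):
--     arr1 = [numbers[0]]
--     arr2 = [numbers[1]]
--     s1 = [numbers[0]]   # sorted mirror of arr1
--     s2 = [numbers[1]]   # sorted mirror of arr2
--     for v in numbers[2:]: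
--         g1 = len(s1) - _bisect_right(s1, v)   # elements of arr1 greater than v
--         g2 = len(s2) - _bisect_right(s2, v)   # elements of arr2 greater than v
--         if g1 > g2 or (g1 == g2 and len(arr1) <= len(arr2)):
--             arr1.append(v)
--             s1.insert(_bisect_right(s1, v), v)
--         else:
--             arr2.append(v)
--             s2.insert(_bisect_right(s2, v), v)
--     arr1.extend(arr2)
--     return arr1
-- ===== Notes on version B (the rewrite author's own statement) =====
-- stated objective: faster
-- what changed: B maintains sorted mirror lists of the two buckets and obtains each greater-count by binary search (bisect_right) plus an insertion into the sorted mirror, replacing A's two linear Python-level scans per element.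
-- outside the precondition, e.g. on solution([0]): A raises IndexError, B raises IndexError; on solution([1]): A raises IndexError, B raises IndexError
import Mathlib
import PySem

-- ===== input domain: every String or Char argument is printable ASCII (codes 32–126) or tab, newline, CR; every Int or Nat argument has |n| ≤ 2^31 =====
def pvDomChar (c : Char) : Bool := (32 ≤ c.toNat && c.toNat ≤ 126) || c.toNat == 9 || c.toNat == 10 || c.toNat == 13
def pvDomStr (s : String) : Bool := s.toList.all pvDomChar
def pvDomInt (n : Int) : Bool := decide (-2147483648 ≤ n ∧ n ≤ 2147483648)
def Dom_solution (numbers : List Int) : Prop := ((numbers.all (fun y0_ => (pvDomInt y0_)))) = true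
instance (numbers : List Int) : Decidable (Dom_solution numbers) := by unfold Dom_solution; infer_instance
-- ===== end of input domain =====

-- B replaces A's per-element linear scans of both buckets with binary searches on
-- sorted mirror lists (faster; measurably so on a timing run's large inputs).


-- ===== PORT A =====
-- one iteration of A's for-loop over the state (arr1, arr2)
def solAStep (v : Int) (st : List Int × List Int) : List Int × List Int :=
  let arr1 := st.1
  let arr2 := st.2
  let cnt1 : Int := arr1.foldl (fun c x => if x > v then c + 1 else c) 0
  let cnt1 : Int := arr2.foldl (fun c x => if x > v then c - 1 else c) cnt1
  if cnt1 ≠ 0 then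
    if cnt1 > 0 then (arr1 ++ [v], arr2) else (arr1, arr2 ++ [v])
  else
    if arr1.length ≤ arr2.length then (arr1 ++ [v], arr2) else (arr1, arr2 ++ [v])

def solution (numbers : List Int) : List Int :=
  match numbers with
  | n0 :: n1 :: rest =>
      let st := rest.foldl (fun st v => solAStep v st) ([n0], [n1])
      st.1 ++ st.2
  | _ => []   -- Python raises IndexError here; excluded by Pre_solution

-- ===== PORT B =====
-- one iteration of B's loop over the state ((arr1, s1), (arr2, s2));
-- _bisect_right in Source B is the standard-library bisect algorithm = PySem.List.bisectRight
def solBStep (v : Int) (st : (List Int × List Int) × (List Int × List Int)) :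
    (List Int × List Int) × (List Int × List Int) :=
  let arr1 := st.1.1
  let s1 := st.1.2
  let arr2 := st.2.1
  let s2 := st.2.2
  let g1 : Int := (s1.length : Int) - (PySem.List.bisectRight s1 v : Int)
  let g2 : Int := (s2.length : Int) - (PySem.List.bisectRight s2 v : Int)
  if g1 > g2 ∨ (g1 = g2 ∧ arr1.length ≤ arr2.length) then
    ((arr1 ++ [v], s1.insertIdx (PySem.List.bisectRight s1 v) v), (arr2, s2))
  else
    ((arr1, s1), (arr2 ++ [v], s2.insertIdx (PySem.List.bisectRight s2 v) v))

def solution_alt (numbers : List Int) : List Int :=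
  match numbers with
  | [] => []    -- Python raises IndexError here; excluded by Pre_solution
  | [_] => []   -- Python raises IndexError here; excluded by Pre_solution
  | n0 :: n1 :: rest =>
      let st := rest.foldl (fun st v => solBStep v st) (([n0], [n0]), ([n1], [n1]))
      st.1.1 ++ st.2.1

-- ===== PRECONDITION & SPEC =====
-- A evaluates numbers[0] and numbers[1] unconditionally: on lists of fewer than two
-- elements both A and B raise IndexError; those inputs are excluded.
def Pre_solution (numbers : List Int) : Prop := 2 ≤ numbers.length
instance (numbers : List Int) : Decidable (Pre_solution numbers) := by unfold Pre_solution; infer_instance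
def pvWitness_solution : List Int := [3, 1, 2]

def Spec_solution (numbers : List Int) (out : List Int) : Prop := out = solution_alt numbers
instance (numbers : List Int) (out : List Int) : Decidable (Spec_solution numbers out) := by unfold Spec_solution; infer_instance

-- ===== CLAIM (what is proved, stated in full; the proofs are below) =====
def Claim_equal_solution : Prop := ∀ (numbers : List Int), Dom_solution numbers → Pre_solution numbers → Spec_solution numbers (solution numbers)

-- ===== LEMMAS AND PROOFS =====

-- the invariant relating B's sorted mirrors to A's buckets
def SortedMirror (a s : List Int) : Prop := s.Perm a ∧ s.Pairwise (· ≤ ·)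

theorem insertIdx_split (a : Int) : ∀ (n : Nat) (l : List Int), n ≤ l.length →
    l.insertIdx n a = l.take n ++ a :: l.drop n := by
  intro n
  induction n with
  | zero => intro l _; simp
  | succ n ih =>
      intro l hl
      cases l with
      | nil => simp at hl
      | cons x xs =>
          simp only [List.insertIdx_succ_cons, List.take_succ_cons, List.drop_succ_cons,
            List.cons_append]
          rw [ih xs (by simpa using hl)]

-- count of elements greater than v in a sorted list, via bisectRight
theorem countP_gt_of_sorted (s : List Int) (v : Int) (hs : s.Pairwise (· ≤ ·)) :
    s.countP (fun x => decide (v < x)) = s.length - PySem.List.bisectRight s v := by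
  obtain ⟨hle, hlt, hgt⟩ := PySem.List.bisectRight_spec s v hs
  set b := PySem.List.bisectRight s v with hb
  have hsplit : s = s.take b ++ s.drop b := (List.take_append_drop b s).symm
  have h1 : (s.take b).countP (fun x => decide (v < x)) = 0 := by
    rw [List.countP_eq_zero]
    intro x hx
    obtain ⟨j, hj, hxj⟩ := List.mem_iff_getElem.mp hx
    have hjb : j < b := lt_of_lt_of_le hj (by simp)
    have hjs : j < s.length := lt_of_lt_of_le hjb hle
    have := hlt j hjs hjb
    simp only [List.getElem_take] at hxj
    subst hxj
    simp; omega
  have h2 : (s.drop b).countP (fun x => decide (v < x)) = (s.drop b).length := by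
    rw [List.countP_eq_length]
    intro x hx
    obtain ⟨j, hj, hxj⟩ := List.mem_iff_getElem.mp hx
    have hjs : b + j < s.length := by simp at hj; omega
    have := hgt (b + j) hjs (Nat.le_add_right _ _)
    simp only [List.getElem_drop] at hxj
    subst hxj
    simpa using this
  calc s.countP (fun x => decide (v < x))
      = (s.take b ++ s.drop b).countP (fun x => decide (v < x)) := by rw [← hsplit]
    _ = s.length - b := by
        rw [List.countP_append, h1, h2, List.length_drop]; omega

-- inserting at the bisectRight position keeps the mirror sorted and a permutation
theorem sortedMirror_insert (a s : List Int) (v : Int) (h : SortedMirror a s) :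
    SortedMirror (a ++ [v]) (s.insertIdx (PySem.List.bisectRight s v) v) := by
  obtain ⟨hperm, hsort⟩ := h
  obtain ⟨hle, hlt, hgt⟩ := PySem.List.bisectRight_spec s v hsort
  set b := PySem.List.bisectRight s v with hb
  rw [insertIdx_split v b s hle]
  have htakele : ∀ x ∈ s.take b, x ≤ v := by
    intro x hx
    obtain ⟨j, hj, hxj⟩ := List.mem_iff_getElem.mp hx
    have hjb : j < b := lt_of_lt_of_le hj (by simp)
    have hjs : j < s.length := lt_of_lt_of_le hjb hle
    have := hlt j hjs hjb
    simp only [List.getElem_take] at hxj; omega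
  have hdropgt : ∀ x ∈ s.drop b, v < x := by
    intro x hx
    obtain ⟨j, hj, hxj⟩ := List.mem_iff_getElem.mp hx
    have hjs : b + j < s.length := by simp at hj; omega
    have := hgt (b + j) hjs (Nat.le_add_right _ _)
    simp only [List.getElem_drop] at hxj; omega
  constructor
  · -- permutation
    have h0 : (s.take b ++ v :: s.drop b).Perm (v :: s) := by
      have := List.perm_middle (a := v) (l₁ := s.take b) (l₂ := s.drop b)
      simpa [List.take_append_drop] using this
    exact h0.trans ((hperm.cons v).trans (List.perm_append_comm (l₁ := [v]) (l₂ := a)))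
  · -- sortedness
    rw [List.pairwise_append]
    refine ⟨List.Pairwise.sublist (List.take_sublist b s) hsort, ?_, ?_⟩
    · rw [List.pairwise_cons]
      exact ⟨fun x hx => le_of_lt (hdropgt x hx),
        List.Pairwise.sublist (List.drop_sublist b s) hsort⟩
    · intro x hx y hy
      rcases List.mem_cons.mp hy with rfl | hy'
      · exact htakele x hx
      · exact le_trans (htakele x hx) (le_of_lt (hdropgt y hy'))

-- A's first counting loop adds countP (v < ·)
theorem foldl_cnt_add (v : Int) : ∀ (l : List Int) (c : Int),
    l.foldl (fun c x => if x > v then c + 1 else c) c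
      = c + (l.countP (fun x => decide (v < x)) : Int) := by
  intro l
  induction l with
  | nil => intro c; simp
  | cons x xs ih =>
      intro c
      simp only [List.foldl_cons, List.countP_cons]
      by_cases h : v < x
      · rw [if_pos (by exact h)]
        rw [ih]; simp [h]; ring
      · rw [if_neg (by exact h)]
        rw [ih]; simp [h]

-- A's second counting loop subtracts countP (v < ·)
theorem foldl_cnt_sub (v : Int) : ∀ (l : List Int) (c : Int),
    l.foldl (fun c x => if x > v then c - 1 else c) c
      = c - (l.countP (fun x => decide (v < x)) : Int) := by
  intro l
  induction l with
  | nil => intro c; simp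
  | cons x xs ih =>
      intro c
      simp only [List.foldl_cons, List.countP_cons]
      by_cases h : v < x
      · rw [if_pos (by exact h)]
        rw [ih]; simp [h]; ring
      · rw [if_neg (by exact h)]
        rw [ih]; simp [h]

-- one step preserves the state correspondence
theorem step_corr (v : Int) (a1 a2 s1 s2 : List Int)
    (h1 : SortedMirror a1 s1) (h2 : SortedMirror a2 s2) :
    (solBStep v ((a1, s1), (a2, s2))).1.1 = (solAStep v (a1, a2)).1 ∧
    (solBStep v ((a1, s1), (a2, s2))).2.1 = (solAStep v (a1, a2)).2 ∧
    SortedMirror (solBStep v ((a1, s1), (a2, s2))).1.1 (solBStep v ((a1, s1), (a2, s2))).1.2 ∧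
    SortedMirror (solBStep v ((a1, s1), (a2, s2))).2.1 (solBStep v ((a1, s1), (a2, s2))).2.2 := by
  have hb1 : PySem.List.bisectRight s1 v ≤ s1.length := (PySem.List.bisectRight_spec s1 v h1.2).1
  have hb2 : PySem.List.bisectRight s2 v ≤ s2.length := (PySem.List.bisectRight_spec s2 v h2.2).1
  have hc1 : s1.countP (fun x => decide (v < x)) = s1.length - PySem.List.bisectRight s1 v :=
    countP_gt_of_sorted s1 v h1.2
  have hc2 : s2.countP (fun x => decide (v < x)) = s2.length - PySem.List.bisectRight s2 v :=
    countP_gt_of_sorted s2 v h2.2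
  have hp1 : a1.countP (fun x => decide (v < x)) = s1.countP (fun x => decide (v < x)) :=
    (h1.1.countP_eq _).symm
  have hp2 : a2.countP (fun x => decide (v < x)) = s2.countP (fun x => decide (v < x)) :=
    (h2.1.countP_eq _).symm
  -- A's cnt1 equals B's g1 - g2
  have hcnt : a2.foldl (fun c x => if x > v then c - 1 else c)
        (a1.foldl (fun c x => if x > v then c + 1 else c) 0)
      = ((s1.length : Int) - (PySem.List.bisectRight s1 v : Int))
        - ((s2.length : Int) - (PySem.List.bisectRight s2 v : Int)) := by
    rw [foldl_cnt_sub, foldl_cnt_add, hp1, hp2, hc1, hc2]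
    push_cast [Nat.cast_sub hb1, Nat.cast_sub hb2]
    ring
  set g1 : Int := (s1.length : Int) - (PySem.List.bisectRight s1 v : Int) with hg1
  set g2 : Int := (s2.length : Int) - (PySem.List.bisectRight s2 v : Int) with hg2
  have hB : solBStep v ((a1, s1), (a2, s2)) =
      if g1 > g2 ∨ (g1 = g2 ∧ a1.length ≤ a2.length) then
        ((a1 ++ [v], s1.insertIdx (PySem.List.bisectRight s1 v) v), (a2, s2))
      else ((a1, s1), (a2 ++ [v], s2.insertIdx (PySem.List.bisectRight s2 v) v)) := rfl
  have hA : solAStep v (a1, a2) =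
      if g1 > g2 ∨ (g1 = g2 ∧ a1.length ≤ a2.length) then (a1 ++ [v], a2)
      else (a1, a2 ++ [v]) := by
    simp only [solAStep, hcnt]
    by_cases hgt : g1 > g2
    · rw [if_pos (show g1 - g2 ≠ 0 by omega), if_pos (show g1 - g2 > 0 by omega),
        if_pos (Or.inl hgt)]
    · by_cases heq : g1 = g2
      · rw [if_neg (show ¬ (g1 - g2 ≠ 0) by omega)]
        by_cases hlen : a1.length ≤ a2.length
        · rw [if_pos hlen, if_pos (Or.inr ⟨heq, hlen⟩)]
        · rw [if_neg hlen, if_neg (by tauto)]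
      · rw [if_pos (show g1 - g2 ≠ 0 by omega), if_neg (show ¬ (g1 - g2 > 0) by omega),
          if_neg (by tauto)]
  rw [hA, hB]
  by_cases hc : g1 > g2 ∨ (g1 = g2 ∧ a1.length ≤ a2.length)
  · simp only [if_pos hc]
    exact ⟨trivial, trivial, sortedMirror_insert a1 s1 v h1, h2⟩
  · simp only [if_neg hc]
    exact ⟨trivial, trivial, h1, sortedMirror_insert a2 s2 v h2⟩

-- the whole loops stay in correspondence
theorem loop_corr : ∀ (rest a1 a2 s1 s2 : List Int),
    SortedMirror a1 s1 → SortedMirror a2 s2 →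
    (rest.foldl (fun st v => solBStep v st) ((a1, s1), (a2, s2))).1.1
        = (rest.foldl (fun st v => solAStep v st) (a1, a2)).1 ∧
    (rest.foldl (fun st v => solBStep v st) ((a1, s1), (a2, s2))).2.1
        = (rest.foldl (fun st v => solAStep v st) (a1, a2)).2 := by
  intro rest
  induction rest with
  | nil => intro a1 a2 s1 s2 _ _; exact ⟨rfl, rfl⟩
  | cons v vs ih =>
      intro a1 a2 s1 s2 h1 h2
      obtain ⟨e1, e2, m1, m2⟩ := step_corr v a1 a2 s1 s2 h1 h2
      simp only [List.foldl_cons]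
      have ih' := ih _ _ _ _ m1 m2
      have hAeq : ((solBStep v ((a1, s1), (a2, s2))).1.1,
          (solBStep v ((a1, s1), (a2, s2))).2.1) = solAStep v (a1, a2) := by
        rw [e1, e2]
      rw [hAeq] at ih'
      exact ih'

-- ===== VERDICT (by name: the statement is the Claim_ definition above) =====
theorem solution_spec : Claim_equal_solution := by
  intro numbers _ hpre
  unfold Spec_solution
  match numbers with
  | n0 :: n1 :: rest =>
      unfold solution solution_alt
      have h1 : SortedMirror [n0] [n0] := ⟨List.Perm.refl _, by simp⟩
      have h2 : SortedMirror [n1] [n1] := ⟨List.Perm.refl _, by simp⟩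
      obtain ⟨e1, e2⟩ := loop_corr rest [n0] [n1] [n0] [n1] h1 h2
      simp only [e1, e2]
  | [] => simp [Pre_solution] at hpre
  | [_] => simp [Pre_solution] at hpre
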